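-- pv_equiv track=rewrite | github.com/carluandraster/teoria-de-la-informacion | PrimerParcial/Unidad3.py | esUnivocamenteDecodificable
-- ===== SOURCE A (Python) =====
-- def esUnivocamenteDecodificable(codigo: list) -> bool:
--     """
--     Verifica si un código es unívocamente decodificable.
--
--     Parámetros:
--         - codigo (list): Lista de cadenas que representan el código.
--     Retorna:
--         - bool: True si el código es unívocamente decodificable, False en caso contrario.
--     Precondiciones:
--         - codigo no está vacío.
--         - codigo es distinto de None
--     """
--     S = [set(codigo), set()]
--     i = 0
--     seguir = True
--     while seguir:
--         for x in S[0]: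
--             for y in S[i]:
--                 if x.startswith(y) and x != y:
--                     S[i+1].add(x[len(y):])
--                 else:
--                     if y.startswith(x) and x != y:
--                         S[i+1].add(y[len(x):])
--         if S[0].intersection(S[i+1]) != set(): # Si la intersección no es vacía, no es unívocamente decodificable
--             respuesta = False
--             seguir = False
--         else:
--             if S[i+1] == set() or S[i+1] in S[0:i+1]:
--                 respuesta = True
--                 seguir = False
--             else:
--                 S.append(set())
--                 i += 1
--     return respuesta
-- ===== SOURCE B (Python) =====
-- def esUnivocamenteDecodificable(codigo: list) -> bool:
--     """
--     Verifica si un codigo es univocamente decodificable (Sardinas-Patterson).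
--
--     Single accumulating-set worklist instead of the layered list of
--     generation sets: 'seen' holds every suffix ever discovered (seeded with
--     the codewords), 'frontier' the ones not yet processed.  A dangling
--     suffix that is itself a codeword means not uniquely decodable; if the
--     frontier empties without that happening, the code is UD.
--     """
--     code = set(codigo)
--     seen = set(code)
--     frontier = code
--     while frontier:
--         new = set()
--         for w in code:
--             for s in frontier:
--                 if w != s:
--                     if s.startswith(w):
--                         t = s[len(w):]
--                     elif w.startswith(s):
--                         t = w[len(s):]
--                     else:
--                         continue
--                     if t in code:
--                         return False
--                     if t not in seen:
--                         new.add(t)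
--         seen |= new
--         frontier = new
--     return True
-- ===== Notes on version B (the rewrite author's own statement) =====
-- stated objective: faster
-- what changed: Replaces the layered list of Sardinas-Patterson generation sets with its 'S[i+1] in S[0:i+1]' cycle test by a single accumulating seen-set plus worklist frontier: each distinct suffix is compared against the codewords only once, a discovered suffix that is a codeword returns False immediately, and termination is an empty frontier (growth fixpoint) instead of level-cycle detection.
import Mathlib
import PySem

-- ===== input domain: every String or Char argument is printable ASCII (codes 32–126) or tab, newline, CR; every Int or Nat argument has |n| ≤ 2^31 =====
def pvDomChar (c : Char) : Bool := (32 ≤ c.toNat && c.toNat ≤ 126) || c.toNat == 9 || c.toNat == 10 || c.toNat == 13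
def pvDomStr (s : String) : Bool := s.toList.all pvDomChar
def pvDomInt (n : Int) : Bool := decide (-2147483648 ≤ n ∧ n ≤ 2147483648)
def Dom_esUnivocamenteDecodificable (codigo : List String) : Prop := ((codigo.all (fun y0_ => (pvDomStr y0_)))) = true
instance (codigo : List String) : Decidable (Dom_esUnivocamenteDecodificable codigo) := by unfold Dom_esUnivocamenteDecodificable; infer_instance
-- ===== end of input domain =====

-- B replaces A's layered list of Sardinas-Patterson generation sets (with its set-cycle test)
-- by a single accumulating seen-set with a worklist frontier, so each distinct suffix is processed
-- once (measured faster); the proofs show both return the same Bool on every input.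

-- ===== PORT A =====
-- A's inner double loop: builds S[i+1] from the pairs x ∈ S[0], y ∈ S[i]
def pvNextA (S0 cur : PySem.Set String) : PySem.Set String :=
  S0.foldl (fun acc x =>
    cur.foldl (fun acc y =>
      if PySem.Str.startswith x y && x != y then
        PySem.Set.add acc (PySem.Str.slice x (some (PySem.Str.len y)) none)
      else if PySem.Str.startswith y x && x != y then
        PySem.Set.add acc (PySem.Str.slice y (some (PySem.Str.len x)) none)
      else acc) acc) PySem.Set.empty

-- A's while loop: cur = S[i], hist = [S[0], …, S[i]]; the fuel only makes the
-- recursion structural — the proofs show it is never exhausted (pigeonhole on level sets)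
def pvLoopA (S0 : PySem.Set String) : Nat → PySem.Set String → List (PySem.Set String) → Bool
  | 0, _, _ => true
  | fuel + 1, cur, hist =>
    let next := pvNextA S0 cur
    if !(PySem.Set.equal (PySem.Set.inter S0 next) PySem.Set.empty) then false
    else if PySem.Set.equal next PySem.Set.empty || hist.any (fun sj => PySem.Set.equal next sj) then true
    else pvLoopA S0 fuel next (hist ++ [next])

def pvN (codigo : List String) : Nat := (codigo.map (fun w => w.toList.length + 1)).sum

def esUnivocamenteDecodificable (codigo : List String) : Bool :=
  let S0 := PySem.Set.ofList codigo
  pvLoopA S0 (2 ^ pvN codigo + 1) S0 [S0]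

-- ===== PORT B =====
-- B's inner 'for s in frontier' loop for one codeword w; none = some suffix is a codeword (return False)
def pvInnerB (code seen : PySem.Set String) (w : String) : List String → PySem.Set String → Option (PySem.Set String)
  | [], acc => some acc
  | s :: rest, acc =>
    if w != s then
      let t? : Option String :=
        if PySem.Str.startswith s w then some (PySem.Str.slice s (some (PySem.Str.len w)) none)
        else if PySem.Str.startswith w s then some (PySem.Str.slice w (some (PySem.Str.len s)) none)
        else none
      match t? with
      | none => pvInnerB code seen w rest acc
      | some t =>
        if PySem.Set.contains code t then none
        else pvInnerB code seen w rest (if PySem.Set.contains seen t then acc else PySem.Set.add acc t)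
    else pvInnerB code seen w rest acc

-- B's outer 'for w in code' loop
def pvOuterB (code seen : PySem.Set String) (frontier : List String) : List String → PySem.Set String → Option (PySem.Set String)
  | [], acc => some acc
  | w :: ws, acc =>
    match pvInnerB code seen w frontier acc with
    | none => none
    | some acc' => pvOuterB code seen frontier ws acc'

-- B's while loop; fuel only makes the recursion structural (seen grows every productive round)
def pvLoopB (code : PySem.Set String) : Nat → PySem.Set String → PySem.Set String → Bool
  | fuel, seen, frontier =>
    if frontier.isEmpty then true
    else match fuel with
      | 0 => true
      | fuel' + 1 =>
        match pvOuterB code seen frontier code (PySem.Set.empty : PySem.Set String) with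
        | none => false
        | some newS => pvLoopB code fuel' (PySem.Set.union seen newS) newS

def esUnivocamenteDecodificable_alt (codigo : List String) : Bool :=
  let code := PySem.Set.ofList codigo
  pvLoopB code ((codigo.map (fun w => w.toList.length + 1)).sum + 2) code code

-- ===== PRECONDITION & SPEC =====
def Spec_esUnivocamenteDecodificable (codigo : List String) (out : Bool) : Prop := out = esUnivocamenteDecodificable_alt codigo
instance (codigo : List String) (out : Bool) : Decidable (Spec_esUnivocamenteDecodificable codigo out) := by unfold Spec_esUnivocamenteDecodificable; infer_instance

-- ===== CLAIM (what is proved, stated in full; the proofs are below) =====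
def Claim_equal_esUnivocamenteDecodificable : Prop := ∀ (codigo : List String), Dom_esUnivocamenteDecodificable codigo → Spec_esUnivocamenteDecodificable codigo (esUnivocamenteDecodificable codigo)

-- ===== LEMMAS AND PROOFS =====

-- The one common suffix-generation step both programs perform on a pair
-- (codeword w, dangling suffix s); B's branch orientation.
def pvGen (w s : String) : Option String :=
  if w != s then
    (if PySem.Str.startswith s w then some (PySem.Str.slice s (some (PySem.Str.len w)) none)
     else if PySem.Str.startswith w s then some (PySem.Str.slice w (some (PySem.Str.len s)) none)
     else none)
  else none

-- semantic layer: exact-level generation sets of A, as Finsets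
def pvGenF (codigo : List String) (s : String) : Finset String :=
  (codigo.filterMap (fun w => pvGen w s)).toFinset

def pvLev (codigo : List String) : Nat → Finset String
  | 0 => codigo.toFinset
  | k + 1 => (pvLev codigo k).biUnion (pvGenF codigo)

def pvBad (codigo : List String) : Prop := ∃ k, ((pvLev codigo (k + 1)) ∩ codigo.toFinset).Nonempty

-- universe of all codeword suffixes
def pvU (codigo : List String) : Finset (List Char) := (codigo.flatMap (fun w => w.toList.tails)).toFinset

lemma toList_injective : Function.Injective String.toList := fun a b h => by
  have := congrArg String.ofList h; simpa using this

lemma startswith_antisymm (x y : String) (h1 : PySem.Str.startswith x y = true)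
    (h2 : PySem.Str.startswith y x = true) : x = y := by
  rw [PySem.Str.startswith_eq, PySem.Chars.startswith_iff] at h1 h2
  exact toList_injective (h2.eq_of_length_le h1.length_le)

-- A's branch chain computes pvGen
lemma pvGenA_eq (x y : String) :
    (if PySem.Str.startswith x y && x != y then some (PySem.Str.slice x (some (PySem.Str.len y)) none)
     else if PySem.Str.startswith y x && x != y then some (PySem.Str.slice y (some (PySem.Str.len x)) none)
     else none) = pvGen x y := by
  by_cases hxy : x = y
  · subst hxy; simp [pvGen]
  · have hb : (x != y) = true := bne_iff_ne.mpr hxy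
    have hb' : (y != x) = true := bne_iff_ne.mpr (Ne.symm hxy)
    by_cases ha : PySem.Str.startswith x y = true
    · by_cases hc : PySem.Str.startswith y x = true
      · exact absurd (startswith_antisymm x y ha hc) hxy
      · rw [PySem.Str.startswith_eq] at ha hc
        simp [pvGen, ha, hb, hc]
    · rw [PySem.Str.startswith_eq] at ha
      simp [pvGen, ha, hb]

lemma ite_add_eq (acc : PySem.Set String) (c1 c2 : Bool) (v1 v2 : String) :
    (if c1 then PySem.Set.add acc v1 else if c2 then PySem.Set.add acc v2 else acc)
    = (match (if c1 then some v1 else if c2 then some v2 else none) with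
       | some u => PySem.Set.add acc u | none => acc) := by
  cases c1 <;> cases c2 <;> simp

lemma mem_foldl_genAdd (f : String → Option String) (l : List String) :
    ∀ (acc : PySem.Set String) (t : String),
      t ∈ l.foldl (fun acc y => match f y with | some u => PySem.Set.add acc u | none => acc) acc
        ↔ t ∈ acc ∨ ∃ y ∈ l, f y = some t := by
  induction l with
  | nil => simp
  | cons y ys ih =>
    intro acc t
    rw [List.foldl_cons, ih]
    cases hf : f y with
    | none =>
      constructor
      · rintro (h | h)
        · exact Or.inl h
        · exact Or.inr ⟨_, by simp [h.choose_spec], h.choose_spec.2⟩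
      · rintro (h | ⟨z, hz, hzt⟩)
        · exact Or.inl h
        · rcases List.mem_cons.mp hz with rfl | hz'
          · rw [hf] at hzt; exact absurd hzt (by simp)
          · exact Or.inr ⟨z, hz', hzt⟩
    | some u =>
      rw [PySem.Set.mem_add]
      constructor
      · rintro ((h | rfl) | ⟨z, hz, hzt⟩)
        · exact Or.inl h
        · exact Or.inr ⟨y, List.mem_cons_self .., hf⟩
        · exact Or.inr ⟨z, List.mem_cons_of_mem _ hz, hzt⟩
      · rintro (h | ⟨z, hz, hzt⟩)
        · exact Or.inl (Or.inl h)
        · rcases List.mem_cons.mp hz with rfl | hz'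
          · rw [hf] at hzt
            exact Or.inl (Or.inr (Option.some_injective _ hzt).symm)
          · exact Or.inr ⟨z, hz', hzt⟩

lemma inner_body_eq (x : String) :
    (fun (acc : PySem.Set String) (y : String) =>
      if PySem.Str.startswith x y && x != y then
        PySem.Set.add acc (PySem.Str.slice x (some (PySem.Str.len y)) none)
      else if PySem.Str.startswith y x && x != y then
        PySem.Set.add acc (PySem.Str.slice y (some (PySem.Str.len x)) none)
      else acc)
    = (fun acc y => match pvGen x y with | some u => PySem.Set.add acc u | none => acc) := by
  funext acc y
  rw [ite_add_eq, pvGenA_eq]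

lemma mem_pvNextA (codigo : List String) (cur : PySem.Set String) (t : String) :
    t ∈ pvNextA (PySem.Set.ofList codigo) cur ↔ ∃ x ∈ codigo, ∃ y ∈ cur, pvGen x y = some t := by
  have outer : ∀ (l : List String) (acc : PySem.Set String),
      t ∈ l.foldl (fun acc x => cur.foldl
        (fun acc y => match pvGen x y with | some u => PySem.Set.add acc u | none => acc) acc) acc
        ↔ t ∈ acc ∨ ∃ x ∈ l, ∃ y ∈ cur, pvGen x y = some t := by
    intro l
    induction l with
    | nil => simp
    | cons x xs ih =>
      intro acc
      rw [List.foldl_cons, ih, mem_foldl_genAdd]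
      constructor
      · rintro ((h | ⟨y, hy, hyt⟩) | ⟨z, hz, h⟩)
        · exact Or.inl h
        · exact Or.inr ⟨x, List.mem_cons_self .., y, hy, hyt⟩
        · exact Or.inr ⟨z, List.mem_cons_of_mem _ hz, h⟩
      · rintro (h | ⟨z, hz, y, hy, hyt⟩)
        · exact Or.inl (Or.inl h)
        · rcases List.mem_cons.mp hz with rfl | hz'
          · exact Or.inl (Or.inr ⟨y, hy, hyt⟩)
          · exact Or.inr ⟨z, hz', y, hy, hyt⟩
  have : pvNextA (PySem.Set.ofList codigo) cur
      = (PySem.Set.ofList codigo).foldl (fun acc x => cur.foldl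
        (fun acc y => match pvGen x y with | some u => PySem.Set.add acc u | none => acc) acc)
        PySem.Set.empty := by
    unfold pvNextA
    congr 1
    funext acc x
    rw [inner_body_eq]
  rw [this, outer]
  simp only [PySem.Set.empty]
  constructor
  · rintro (h | ⟨x, hx, hrest⟩)
    · exact absurd h (List.not_mem_nil)
    · exact ⟨x, (PySem.Set.mem_ofList _ _).mp hx, hrest⟩
  · rintro ⟨x, hx, hrest⟩
    exact Or.inr ⟨x, (PySem.Set.mem_ofList _ _).mpr hx, hrest⟩

lemma pvNextA_toFinset (codigo : List String) (cur : PySem.Set String) (X : Finset String)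
    (h : ∀ u, u ∈ cur ↔ u ∈ X) :
    ∀ u, u ∈ pvNextA (PySem.Set.ofList codigo) cur ↔ u ∈ X.biUnion (pvGenF codigo) := by
  intro u
  rw [mem_pvNextA, Finset.mem_biUnion]
  constructor
  · rintro ⟨x, hx, y, hy, hxy⟩
    exact ⟨y, (h y).mp hy, by
      simp only [pvGenF, List.mem_toFinset, List.mem_filterMap]
      exact ⟨x, hx, hxy⟩⟩
  · rintro ⟨y, hy, hu⟩
    simp only [pvGenF, List.mem_toFinset, List.mem_filterMap] at hu
    obtain ⟨x, hx, hxy⟩ := hu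
    exact ⟨x, hx, y, (h y).mpr hy, hxy⟩

lemma mem_pvU (codigo : List String) (x : List Char) :
    x ∈ pvU codigo ↔ ∃ w ∈ codigo, x <:+ w.toList := by
  simp [pvU, List.mem_flatMap, List.mem_tails]

lemma pvGen_mem_U (codigo : List String) (w s t : String) (hw : w ∈ codigo)
    (hs : s.toList ∈ pvU codigo) (h : pvGen w s = some t) : t.toList ∈ pvU codigo := by
  have hdrop : ∀ (a b : String),
      (PySem.Str.slice a (some (PySem.Str.len b)) none).toList = a.toList.drop b.toList.length := by
    intro a b
    rw [PySem.Str.toList_slice, PySem.Chars.slice_eq_listSlice, PySem.Str.len_eq,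
      PySem.List.slice_from_natCast]
  unfold pvGen at h
  split_ifs at h with h1 h2 h3
  · have ht : t = PySem.Str.slice s (some (PySem.Str.len w)) none := (Option.some_inj.mp h).symm
    have htl : t.toList <:+ s.toList := by
      rw [ht, hdrop]; exact s.toList.drop_suffix _
    obtain ⟨cw, hcw, hsfx⟩ := (mem_pvU codigo s.toList).mp hs
    exact (mem_pvU codigo _).mpr ⟨cw, hcw, htl.trans hsfx⟩
  · have ht : t = PySem.Str.slice w (some (PySem.Str.len s)) none := (Option.some_inj.mp h).symm
    have htl : t.toList <:+ w.toList := by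
      rw [ht, hdrop]; exact w.toList.drop_suffix _
    exact (mem_pvU codigo _).mpr ⟨w, hw, htl⟩

lemma pvLev_subset_U (codigo : List String) : ∀ k, ∀ t ∈ pvLev codigo k, t.toList ∈ pvU codigo := by
  intro k
  induction k with
  | zero =>
    intro t ht
    exact (mem_pvU codigo _).mpr ⟨t, List.mem_toFinset.mp ht, List.suffix_refl _⟩
  | succ k ih =>
    intro t ht
    rw [pvLev, Finset.mem_biUnion] at ht
    obtain ⟨s, hs, hgen⟩ := ht
    simp only [pvGenF, List.mem_toFinset, List.mem_filterMap] at hgen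
    obtain ⟨x, hx, hxy⟩ := hgen
    exact pvGen_mem_U codigo x s t hx (ih s hs) hxy

lemma pvU_card_le (codigo : List String) : (pvU codigo).card ≤ pvN codigo := by
  calc (pvU codigo).card ≤ (codigo.flatMap (fun w => w.toList.tails)).length :=
        List.toFinset_card_le _
    _ = pvN codigo := by
        rw [List.length_flatMap]
        unfold pvN
        congr 1
        exact List.map_congr_left fun w _ => List.length_tails _

lemma levels_card_le (codigo : List String) (n : Nat)
    (hdist : ∀ j k, j < k → k < n → pvLev codigo j ≠ pvLev codigo k) :
    n ≤ 2 ^ (pvU codigo).card := by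
  classical
  have hmaps : ∀ j ∈ Finset.range n,
      (pvLev codigo j).image String.toList ∈ (pvU codigo).powerset := by
    intro j _
    rw [Finset.mem_powerset]
    intro x hx
    obtain ⟨t, ht, rfl⟩ := Finset.mem_image.mp hx
    exact pvLev_subset_U codigo j t ht
  have hinj : Set.InjOn (fun j => (pvLev codigo j).image String.toList) (Finset.range n) := by
    intro j hj k hk hEq
    by_contra hne
    rcases Nat.lt_or_ge j k with hlt | hge
    · exact hdist j k hlt (Finset.mem_coe.mp hk |> Finset.mem_range.mp)
        (Finset.image_injective toList_injective hEq)
    · have hlt : k < j := lt_of_le_of_ne hge (fun h => hne h.symm)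
      exact hdist k j hlt (Finset.mem_coe.mp hj |> Finset.mem_range.mp)
        (Finset.image_injective toList_injective hEq.symm)
  calc n = (Finset.range n).card := (Finset.card_range n).symm
    _ ≤ ((pvU codigo).powerset).card := Finset.card_le_card_of_injOn _ hmaps hinj
    _ = 2 ^ (pvU codigo).card := Finset.card_powerset _

-- no level from 1 on meets the code once a cycle or the empty set appears
lemma not_bad_of_empty (codigo : List String) (i : Nat)
    (hchk : ∀ k ≤ i, pvLev codigo (k + 1) ∩ codigo.toFinset = ∅)
    (hemp : pvLev codigo (i + 1) = ∅) : ¬ pvBad codigo := by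
  have hall : ∀ m, pvLev codigo (i + 1 + m) = ∅ := by
    intro m
    induction m with
    | zero => exact hemp
    | succ m ih =>
      show pvLev codigo (i + 1 + m + 1) = ∅
      rw [pvLev, ih]
      simp
  rintro ⟨k, t, ht⟩
  rw [Finset.mem_inter] at ht
  rcases Nat.lt_or_ge i k with hk2 | hk2
  · have : pvLev codigo (k + 1) = ∅ := by
      have := hall (k - i)
      rwa [show i + 1 + (k - i) = k + 1 by omega] at this
    exact absurd ht.1 (by rw [this]; exact Finset.notMem_empty t)
  · have := hchk k hk2
    exact absurd (Finset.mem_inter.mpr ht) (by rw [this]; exact Finset.notMem_empty t)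

lemma not_bad_of_cycle (codigo : List String) (i j : Nat) (hj : j ≤ i)
    (hchk : ∀ k ≤ i, pvLev codigo (k + 1) ∩ codigo.toFinset = ∅)
    (hcyc : pvLev codigo (i + 1) = pvLev codigo j) : ¬ pvBad codigo := by
  have hall : ∀ m, 1 ≤ m → ∃ j', 1 ≤ j' ∧ j' ≤ i + 1 ∧ pvLev codigo m = pvLev codigo j' := by
    intro m
    induction m with
    | zero => omega
    | succ m ih =>
      intro _
      rcases Nat.eq_zero_or_pos m with rfl | hm
      · exact ⟨1, le_refl 1, by omega, rfl⟩
      · obtain ⟨j', h1, h2, hEq⟩ := ih hm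
        rcases Nat.lt_or_ge j' (i + 1) with hlt | hge
        · exact ⟨j' + 1, by omega, by omega, by rw [pvLev, hEq, ← pvLev]⟩
        · have hj' : j' = i + 1 := by omega
          refine ⟨j + 1, by omega, by omega, ?_⟩
          rw [pvLev, hEq, hj', hcyc, ← pvLev]
  rintro ⟨k, t, ht⟩
  obtain ⟨j', h1, h2, hEq⟩ := hall (k + 1) (by omega)
  rw [hEq] at ht
  have := hchk (j' - 1) (by omega)
  rw [show j' - 1 + 1 = j' by omega] at this
  rw [this] at ht
  exact absurd ht (Finset.notMem_empty t)

lemma loopA_spec (codigo : List String) : ∀ (fuel : Nat) (cur : PySem.Set String) (hist : List (PySem.Set String)),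
    hist ≠ [] →
    (∀ (j : Nat) (hj : j < hist.length), ∀ u, u ∈ hist[j] ↔ u ∈ pvLev codigo j) →
    (∀ u, u ∈ cur ↔ u ∈ pvLev codigo (hist.length - 1)) →
    (∀ j k, j < k → k < hist.length → pvLev codigo j ≠ pvLev codigo k) →
    (∀ k, k + 1 < hist.length → pvLev codigo (k + 1) ∩ codigo.toFinset = ∅) →
    2 ^ pvN codigo + 2 ≤ fuel + hist.length →
    ((pvLoopA (PySem.Set.ofList codigo) fuel cur hist = false) ↔ pvBad codigo) := by
  intro fuel
  induction fuel with
  | zero =>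
    intro cur hist hne hhist hcur hdist hchk hfuel
    exfalso
    have h1 : hist.length ≤ 2 ^ (pvU codigo).card := levels_card_le codigo hist.length hdist
    have h2 : 2 ^ (pvU codigo).card ≤ 2 ^ pvN codigo :=
      Nat.pow_le_pow_right (by norm_num) (pvU_card_le codigo)
    omega
  | succ fuel ih =>
    intro cur hist hne hhist hcur hdist hchk hfuel
    have hlen1 : 1 ≤ hist.length := List.length_pos_of_ne_nil hne
    have hLev : pvLev codigo hist.length
        = (pvLev codigo (hist.length - 1)).biUnion (pvGenF codigo) := by
      conv_lhs => rw [show hist.length = (hist.length - 1) + 1 by omega]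
      rw [pvLev]
    have hnext : ∀ u, u ∈ pvNextA (PySem.Set.ofList codigo) cur ↔ u ∈ pvLev codigo hist.length := by
      intro u
      rw [hLev]
      exact pvNextA_toFinset codigo cur (pvLev codigo (hist.length - 1)) hcur u
    rw [pvLoopA]
    by_cases hc1 : PySem.Set.equal
        (PySem.Set.inter (PySem.Set.ofList codigo) (pvNextA (PySem.Set.ofList codigo) cur))
        PySem.Set.empty = true
    · -- intersection empty: no suffix at this level is a codeword
      have hI : pvLev codigo hist.length ∩ codigo.toFinset = ∅ := by
        apply Finset.eq_empty_iff_forall_notMem.mpr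
        intro x hx
        rw [Finset.mem_inter] at hx
        have hiff := (PySem.Set.equal_iff _ _).mp hc1 x
        have hxin : x ∈ PySem.Set.inter (PySem.Set.ofList codigo)
            (pvNextA (PySem.Set.ofList codigo) cur) :=
          (PySem.Set.mem_inter _ _ _).mpr
            ⟨(PySem.Set.mem_ofList _ _).mpr (List.mem_toFinset.mp hx.2), (hnext x).mpr hx.1⟩
        have : x ∈ (PySem.Set.empty : PySem.Set String) := hiff.mp hxin
        exact absurd this (List.not_mem_nil)
      have hchkAll : ∀ k ≤ hist.length - 1, pvLev codigo (k + 1) ∩ codigo.toFinset = ∅ := by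
        intro k hk
        rcases Nat.lt_or_ge k (hist.length - 1) with hlt | hge
        · exact hchk k (by omega)
        · have : k = hist.length - 1 := by omega
          subst this
          rwa [show hist.length - 1 + 1 = hist.length by omega]
      simp only [hc1, Bool.not_true, Bool.false_eq_true, if_false]
      by_cases hc2 : (PySem.Set.equal (pvNextA (PySem.Set.ofList codigo) cur) PySem.Set.empty
          || hist.any fun sj => PySem.Set.equal (pvNextA (PySem.Set.ofList codigo) cur) sj) = true
      · simp only [hc2, if_true]
        apply iff_of_false (by simp)
        rcases Bool.or_eq_true_iff.mp hc2 with hemp | hany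
        · -- empty new level
          have hEmp : pvLev codigo hist.length = ∅ := by
            apply Finset.eq_empty_iff_forall_notMem.mpr
            intro x hx
            have hiff := (PySem.Set.equal_iff _ _).mp hemp x
            exact absurd (hiff.mp ((hnext x).mpr hx)) (List.not_mem_nil)
          have := not_bad_of_empty codigo (hist.length - 1) hchkAll
            (by rwa [show hist.length - 1 + 1 = hist.length by omega])
          exact this
        · obtain ⟨sj, hsj, heq⟩ := List.any_eq_true.mp hany
          obtain ⟨j, hj, rfl⟩ := List.mem_iff_getElem.mp hsj
          have hcyc : pvLev codigo hist.length = pvLev codigo j := by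
            apply Finset.ext
            intro x
            have hiff := (PySem.Set.equal_iff _ _).mp heq x
            rw [← hnext x, hiff, hhist j hj]
          exact not_bad_of_cycle codigo (hist.length - 1) j (by omega) hchkAll
            (by rwa [show hist.length - 1 + 1 = hist.length by omega])
      · simp only [hc2, Bool.false_eq_true, if_false]
        have hboth := Bool.or_eq_false_iff.mp (Bool.eq_false_iff.mpr hc2)
        apply ih
        · simp
        · intro j hj u
          rw [List.length_append, List.length_singleton] at hj
          rcases Nat.lt_or_ge j hist.length with hlt | hge
          · rw [List.getElem_append_left hlt]
            exact hhist j hlt u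
          · have hjeq : j = hist.length := by omega
            subst hjeq
            rw [List.getElem_concat_length]
            · exact hnext u
            · rfl
        · intro u
          rw [List.length_append, List.length_singleton,
            show hist.length + 1 - 1 = hist.length by omega]
          exact hnext u
        · intro j k hjk hk
          rw [List.length_append, List.length_singleton] at hk
          rcases Nat.lt_or_ge k hist.length with hlt | hge
          · exact hdist j k hjk hlt
          · have hkeq : k = hist.length := by omega
            subst hkeq
            intro hEq
            have hanyf : (hist.any fun sj =>
                PySem.Set.equal (pvNextA (PySem.Set.ofList codigo) cur) sj) = false := hboth.2
            have : PySem.Set.equal (pvNextA (PySem.Set.ofList codigo) cur) hist[j] = true := by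
              apply (PySem.Set.equal_iff _ _).mpr
              intro x
              rw [hnext x, hhist j hjk x, hEq]
            have := List.any_eq_true.mpr ⟨hist[j], hist.getElem_mem hjk, this⟩
            rw [hanyf] at this
            cases this
        · intro k hk
          rw [List.length_append, List.length_singleton] at hk
          rcases Nat.lt_or_ge (k + 1) hist.length with hlt | hge
          · exact hchk k hlt
          · have : k + 1 = hist.length := by omega
            rw [this]
            exact hI
        · rw [List.length_append, List.length_singleton]
          omega
    · -- intersection nonempty: A answers False, and this is a genuine bad pair
      have hc1' : PySem.Set.equal
          (PySem.Set.inter (PySem.Set.ofList codigo) (pvNextA (PySem.Set.ofList codigo) cur))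
          PySem.Set.empty = false := Bool.eq_false_iff.mpr hc1
      have hcond : (!PySem.Set.equal
          (PySem.Set.inter (PySem.Set.ofList codigo) (pvNextA (PySem.Set.ofList codigo) cur))
          PySem.Set.empty) = true := by rw [hc1']; rfl
      rw [if_pos hcond]
      apply iff_of_true rfl
      have : ¬ ∀ x, x ∈ PySem.Set.inter (PySem.Set.ofList codigo)
          (pvNextA (PySem.Set.ofList codigo) cur) ↔ x ∈ (PySem.Set.empty : PySem.Set String) := by
        intro hall
        exact hc1 ((PySem.Set.equal_iff _ _).mpr hall)
      push Not at this
      obtain ⟨x, hx⟩ := this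
      have hxin : x ∈ PySem.Set.inter (PySem.Set.ofList codigo)
          (pvNextA (PySem.Set.ofList codigo) cur) := by
        rcases hx with ⟨h, _⟩ | ⟨_, h⟩
        · exact h
        · exact absurd h (List.not_mem_nil)
      obtain ⟨hx1, hx2⟩ := (PySem.Set.mem_inter _ _ _).mp hxin
      refine ⟨hist.length - 1, x, Finset.mem_inter.mpr ⟨?_, ?_⟩⟩
      · rw [show hist.length - 1 + 1 = hist.length by omega]
        exact (hnext x).mp hx2
      · exact List.mem_toFinset.mpr ((PySem.Set.mem_ofList _ _).mp hx1)

lemma esUD_iff_bad (codigo : List String) :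
    (esUnivocamenteDecodificable codigo = false) ↔ pvBad codigo := by
  unfold esUnivocamenteDecodificable
  apply loopA_spec codigo
  · simp
  · intro j hj u
    simp only [List.length_singleton] at hj
    have : j = 0 := by omega
    subst this
    simp only [List.getElem_singleton]
    rw [PySem.Set.mem_ofList]
    show u ∈ codigo ↔ u ∈ pvLev codigo 0
    rw [pvLev, List.mem_toFinset]
  · intro u
    simp only [List.length_singleton]
    rw [PySem.Set.mem_ofList]
    show u ∈ codigo ↔ u ∈ pvLev codigo 0
    rw [pvLev, List.mem_toFinset]
  · intro j k hjk hk
    simp only [List.length_singleton] at hk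
    omega
  · intro k hk
    simp only [List.length_singleton] at hk
    omega
  · simp only [List.length_singleton]
    omega

-- ---- B side ----

def pvHit (codigo : List String) (frontier : List String) (w : String) : Prop :=
  ∃ s ∈ frontier, ∃ t, pvGen w s = some t ∧ t ∈ codigo

def pvNew (seen frontier : List String) (w u : String) : Prop :=
  (∃ s ∈ frontier, pvGen w s = some u) ∧ u ∉ seen

lemma pvNew_cons (seen : List String) (s : String) (fr : List String) (w u : String) :
    pvNew seen (s :: fr) w u ↔ ((pvGen w s = some u ∧ u ∉ seen) ∨ pvNew seen fr w u) := by
  simp only [pvNew, List.mem_cons]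
  constructor
  · rintro ⟨⟨s', rfl | hs', hg⟩, hns⟩
    · exact Or.inl ⟨hg, hns⟩
    · exact Or.inr ⟨⟨s', hs', hg⟩, hns⟩
  · rintro (⟨hg, hns⟩ | ⟨⟨s', hs', hg⟩, hns⟩)
    · exact ⟨⟨s, Or.inl rfl, hg⟩, hns⟩
    · exact ⟨⟨s', Or.inr hs', hg⟩, hns⟩

lemma innerB_spec (codigo : List String) (seen : PySem.Set String) (w : String) :
    ∀ (fr : List String) (acc : PySem.Set String),
      (pvInnerB (PySem.Set.ofList codigo) seen w fr acc = none ↔ pvHit codigo fr w)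
      ∧ (∀ res, pvInnerB (PySem.Set.ofList codigo) seen w fr acc = some res →
          ∀ u, u ∈ res ↔ u ∈ acc ∨ pvNew seen fr w u) := by
  intro fr
  induction fr with
  | nil =>
    intro acc
    refine ⟨⟨fun h => absurd h (by simp [pvInnerB]), ?_⟩, ?_⟩
    · rintro ⟨s, hs, _⟩
      exact absurd hs (List.not_mem_nil)
    · intro res h u
      have : res = acc := by
        simpa [pvInnerB] using h.symm
      subst this
      simp [pvNew]
  | cons s rest ih =>
    intro acc
    by_cases hws : (w != s) = true
    · have hgen : pvGen w s
          = (if PySem.Str.startswith s w then some (PySem.Str.slice s (some (PySem.Str.len w)) none)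
             else if PySem.Str.startswith w s then some (PySem.Str.slice w (some (PySem.Str.len s)) none)
             else none) := by
        unfold pvGen
        rw [if_pos hws]
      have hstep : pvInnerB (PySem.Set.ofList codigo) seen w (s :: rest) acc
          = (match pvGen w s with
             | none => pvInnerB (PySem.Set.ofList codigo) seen w rest acc
             | some t =>
               if PySem.Set.contains (PySem.Set.ofList codigo) t then none
               else pvInnerB (PySem.Set.ofList codigo) seen w rest
                 (if PySem.Set.contains seen t then acc else PySem.Set.add acc t)) := by
        rw [pvInnerB, if_pos hws, hgen]
      cases hg : pvGen w s with
      | none =>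
        rw [hstep, hg]
        refine ⟨⟨fun h => ?_, fun h => ?_⟩, ?_⟩
        · obtain ⟨s', hs', ht⟩ := ((ih acc).1).mp h
          exact ⟨s', List.mem_cons_of_mem _ hs', ht⟩
        · obtain ⟨s', hs', t, ht, htc⟩ := h
          rcases List.mem_cons.mp hs' with rfl | hs''
          · rw [hg] at ht; cases ht
          · exact ((ih acc).1).mpr ⟨s', hs'', t, ht, htc⟩
        · intro res hres u
          rw [(ih acc).2 res hres u, pvNew_cons, hg]
          simp
      | some t =>
        rw [hstep, hg]
        dsimp only
        by_cases hcode : PySem.Set.contains (PySem.Set.ofList codigo) t = true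
        · rw [if_pos hcode]
          refine ⟨⟨fun _ => ?_, fun _ => rfl⟩, ?_⟩
          · exact ⟨s, List.mem_cons_self .., t, hg,
              (PySem.Set.mem_ofList _ _).mp ((PySem.Set.contains_iff _ _).mp hcode)⟩
          · intro res hres
            cases hres
        · rw [if_neg hcode]
          have htnc : t ∉ codigo := fun hc =>
            hcode ((PySem.Set.contains_iff _ _).mpr ((PySem.Set.mem_ofList _ _).mpr hc))
          set acc' := if PySem.Set.contains seen t then acc else PySem.Set.add acc t with hacc'
          refine ⟨⟨fun h => ?_, fun h => ?_⟩, ?_⟩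
          · obtain ⟨s', hs', ht⟩ := ((ih acc').1).mp h
            exact ⟨s', List.mem_cons_of_mem _ hs', ht⟩
          · obtain ⟨s', hs', t', ht', htc⟩ := h
            rcases List.mem_cons.mp hs' with rfl | hs''
            · rw [hg] at ht'
              cases ht'
              exact absurd htc htnc
            · exact ((ih acc').1).mpr ⟨s', hs'', t', ht', htc⟩
          · intro res hres u
            rw [(ih acc').2 res hres u, pvNew_cons, hg]
            have hacc'mem : u ∈ acc' ↔ u ∈ acc ∨ (u = t ∧ t ∉ seen) := by
              rw [hacc']
              by_cases hseen : PySem.Set.contains seen t = true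
              · rw [if_pos hseen]
                have : t ∈ seen := (PySem.Set.contains_iff _ _).mp hseen
                simp only [iff_self_or]
                rintro ⟨rfl, hns⟩
                exact absurd this hns
              · rw [if_neg hseen, PySem.Set.mem_add]
                have : t ∉ seen := fun hc => hseen ((PySem.Set.contains_iff _ _).mpr hc)
                tauto
            rw [hacc'mem]
            constructor
            · rintro ((hu | ⟨rfl, hts⟩) | hnew)
              · exact Or.inl hu
              · exact Or.inr (Or.inl ⟨rfl, hts⟩)
              · exact Or.inr (Or.inr hnew)
            · rintro (hu | (⟨hut, hts⟩ | hnew))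
              · exact Or.inl (Or.inl hu)
              · obtain rfl : u = t := (Option.some_inj.mp hut).symm
                exact Or.inl (Or.inr ⟨rfl, hts⟩)
              · exact Or.inr hnew
    · have hgen : pvGen w s = none := by
        unfold pvGen
        rw [if_neg hws]
      have hstep : pvInnerB (PySem.Set.ofList codigo) seen w (s :: rest) acc
          = pvInnerB (PySem.Set.ofList codigo) seen w rest acc := by
        rw [pvInnerB, if_neg hws]
      rw [hstep]
      refine ⟨⟨fun h => ?_, fun h => ?_⟩, ?_⟩
      · obtain ⟨s', hs', ht⟩ := ((ih acc).1).mp h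
        exact ⟨s', List.mem_cons_of_mem _ hs', ht⟩
      · obtain ⟨s', hs', t, ht, htc⟩ := h
        rcases List.mem_cons.mp hs' with rfl | hs''
        · rw [hgen] at ht; cases ht
        · exact ((ih acc).1).mpr ⟨s', hs'', t, ht, htc⟩
      · intro res hres u
        rw [(ih acc).2 res hres u, pvNew_cons, hgen]
        simp

lemma outerB_spec (codigo : List String) (seen : PySem.Set String) (frontier : List String) :
    ∀ (ws : List String) (acc : PySem.Set String),
      (pvOuterB (PySem.Set.ofList codigo) seen frontier ws acc = none ↔ ∃ w ∈ ws, pvHit codigo frontier w)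
      ∧ (∀ res, pvOuterB (PySem.Set.ofList codigo) seen frontier ws acc = some res →
          ∀ u, u ∈ res ↔ u ∈ acc ∨ ∃ w ∈ ws, pvNew seen frontier w u) := by
  intro ws
  induction ws with
  | nil =>
    intro acc
    refine ⟨⟨fun h => absurd h (by simp [pvOuterB]), fun h => ?_⟩, ?_⟩
    · obtain ⟨w, hw, _⟩ := h
      exact absurd hw (List.not_mem_nil)
    · intro res h u
      have : res = acc := by simpa [pvOuterB] using h.symm
      subst this
      simp
  | cons w ws ih =>
    intro acc
    have hinner := innerB_spec codigo seen w frontier acc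
    have hstep : pvOuterB (PySem.Set.ofList codigo) seen frontier (w :: ws) acc
        = (match pvInnerB (PySem.Set.ofList codigo) seen w frontier acc with
           | none => none
           | some acc' => pvOuterB (PySem.Set.ofList codigo) seen frontier ws acc') := by
      rw [pvOuterB]
    cases hin : pvInnerB (PySem.Set.ofList codigo) seen w frontier acc with
    | none =>
      rw [hstep, hin]
      dsimp only
      refine ⟨⟨fun _ => ⟨w, List.mem_cons_self .., hinner.1.mp hin⟩, fun _ => rfl⟩, ?_⟩
      intro res hres
      cases hres
    | some acc' =>
      rw [hstep, hin]
      dsimp only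
      have hnohit : ¬ pvHit codigo frontier w := fun hh => by
        rw [← hinner.1] at hh
        rw [hh] at hin
        cases hin
      have hacc' := hinner.2 acc' hin
      refine ⟨⟨fun h => ?_, fun h => ?_⟩, ?_⟩
      · obtain ⟨w', hw', hh⟩ := ((ih acc').1).mp h
        exact ⟨w', List.mem_cons_of_mem _ hw', hh⟩
      · obtain ⟨w', hw', hh⟩ := h
        rcases List.mem_cons.mp hw' with rfl | hw''
        · exact absurd hh hnohit
        · exact ((ih acc').1).mpr ⟨w', hw'', hh⟩
      · intro res hres u
        rw [(ih acc').2 res hres u, hacc' u]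
        constructor
        · rintro ((hu | hnew) | ⟨w', hw', hnew⟩)
          · exact Or.inl hu
          · exact Or.inr ⟨w, List.mem_cons_self .., hnew⟩
          · exact Or.inr ⟨w', List.mem_cons_of_mem _ hw', hnew⟩
        · rintro (hu | ⟨w', hw', hnew⟩)
          · exact Or.inl (Or.inl hu)
          · rcases List.mem_cons.mp hw' with rfl | hw''
            · exact Or.inl (Or.inr hnew)
            · exact Or.inr ⟨w', hw'', hnew⟩

lemma notbad_of_saturated (codigo : List String) (seen : PySem.Set String)
    (h1 : ∀ t ∈ codigo, t ∈ seen)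
    (h3 : ∀ s ∈ seen, ∀ w ∈ codigo, ∀ t, pvGen w s = some t → t ∈ seen ∧ t ∉ codigo) :
    ¬ pvBad codigo := by
  have hLev : ∀ m, ∀ t ∈ pvLev codigo m, t ∈ seen := by
    intro m
    induction m with
    | zero => exact fun t ht => h1 t (List.mem_toFinset.mp ht)
    | succ m ih =>
      intro t ht
      rw [pvLev, Finset.mem_biUnion] at ht
      obtain ⟨s, hs, hgen⟩ := ht
      simp only [pvGenF, List.mem_toFinset, List.mem_filterMap] at hgen
      obtain ⟨w, hw, hwt⟩ := hgen
      exact (h3 s (ih s hs) w hw t hwt).1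
  rintro ⟨k, t, ht⟩
  rw [Finset.mem_inter] at ht
  obtain ⟨htl, htc⟩ := ht
  rw [pvLev, Finset.mem_biUnion] at htl
  obtain ⟨s, hs, hgen⟩ := htl
  simp only [pvGenF, List.mem_toFinset, List.mem_filterMap] at hgen
  obtain ⟨w, hw, hwt⟩ := hgen
  exact (h3 s (hLev k s hs) w hw t hwt).2 (List.mem_toFinset.mp htc)

lemma seen_card_le (codigo : List String) (seen : PySem.Set String)
    (h4 : ∀ t ∈ seen, t.toList ∈ pvU codigo) : seen.toFinset.card ≤ pvN codigo := by
  have h1 : (seen.toFinset.image String.toList).card = seen.toFinset.card :=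
    Finset.card_image_of_injective _ toList_injective
  have h2 : seen.toFinset.image String.toList ⊆ pvU codigo := by
    intro x hx
    obtain ⟨t, ht, rfl⟩ := Finset.mem_image.mp hx
    exact h4 t (List.mem_toFinset.mp ht)
  calc seen.toFinset.card = (seen.toFinset.image String.toList).card := h1.symm
    _ ≤ (pvU codigo).card := Finset.card_le_card h2
    _ ≤ pvN codigo := pvU_card_le codigo

lemma loopB_spec (codigo : List String) : ∀ (fuel : Nat) (seen frontier : PySem.Set String),
    (∀ t ∈ frontier, t ∈ seen) →
    (∀ t ∈ codigo, t ∈ seen) →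
    (∀ t ∈ seen, ∃ m, t ∈ pvLev codigo m) →
    (∀ s ∈ seen, s ∉ frontier → ∀ w ∈ codigo, ∀ t, pvGen w s = some t → t ∈ seen ∧ t ∉ codigo) →
    (∀ t ∈ seen, t.toList ∈ pvU codigo) →
    (frontier ≠ [] → pvN codigo + 1 ≤ fuel + seen.toFinset.card) →
    ((pvLoopB (PySem.Set.ofList codigo) fuel seen frontier = false) ↔ pvBad codigo) := by
  intro fuel
  induction fuel with
  | zero =>
    intro seen frontier h0 h1 h2 h3 h4 h5
    by_cases hfe : frontier.isEmpty = true
    · rw [pvLoopB, if_pos hfe]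
      apply iff_of_false (by simp)
      have hfr : frontier = [] := List.isEmpty_iff.mp hfe
      subst hfr
      exact notbad_of_saturated codigo seen h1
        (fun s hs w hw t hgen => h3 s hs (List.not_mem_nil) w hw t hgen)
    · exfalso
      have hfr : frontier ≠ [] := fun h => hfe (by rw [h]; rfl)
      have := h5 hfr
      have := seen_card_le codigo seen h4
      omega
  | succ fuel ih =>
    intro seen frontier h0 h1 h2 h3 h4 h5
    by_cases hfe : frontier.isEmpty = true
    · rw [pvLoopB, if_pos hfe]
      apply iff_of_false (by simp)
      have hfr : frontier = [] := List.isEmpty_iff.mp hfe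
      subst hfr
      exact notbad_of_saturated codigo seen h1
        (fun s hs w hw t hgen => h3 s hs (List.not_mem_nil) w hw t hgen)
    · have hfr : frontier ≠ [] := fun h => hfe (by rw [h]; rfl)
      rw [pvLoopB, if_neg hfe]
      have hout := outerB_spec codigo seen frontier (PySem.Set.ofList codigo)
        (PySem.Set.empty : PySem.Set String)
      cases houter : pvOuterB (PySem.Set.ofList codigo) seen frontier
          (PySem.Set.ofList codigo) (PySem.Set.empty : PySem.Set String) with
      | none =>
        apply iff_of_true rfl
        obtain ⟨w, hw, s, hs, t, hgen, htc⟩ := hout.1.mp houter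
        obtain ⟨m, hm⟩ := h2 s (h0 s hs)
        refine ⟨m, t, Finset.mem_inter.mpr ⟨?_, List.mem_toFinset.mpr htc⟩⟩
        rw [pvLev, Finset.mem_biUnion]
        exact ⟨s, hm, by
          simp only [pvGenF, List.mem_toFinset, List.mem_filterMap]
          exact ⟨w, (PySem.Set.mem_ofList _ _).mp hw, hgen⟩⟩
      | some newS =>
        have hmemnew : ∀ u, u ∈ newS ↔ ∃ w ∈ codigo, pvNew seen frontier w u := by
          intro u
          rw [hout.2 newS houter u]
          constructor
          · rintro (h | ⟨w, hw, hnew⟩)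
            · exact absurd h (List.not_mem_nil)
            · exact ⟨w, (PySem.Set.mem_ofList _ _).mp hw, hnew⟩
          · rintro ⟨w, hw, hnew⟩
            exact Or.inr ⟨w, (PySem.Set.mem_ofList _ _).mpr hw, hnew⟩
        have hnohit : ¬ ∃ w ∈ codigo, pvHit codigo frontier w := by
          rintro ⟨w, hw, hh⟩
          have : pvOuterB (PySem.Set.ofList codigo) seen frontier
              (PySem.Set.ofList codigo) (PySem.Set.empty : PySem.Set String) = none :=
            hout.1.mpr ⟨w, (PySem.Set.mem_ofList _ _).mpr hw, hh⟩
          rw [houter] at this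
          cases this
        apply ih
        · intro t ht
          exact (PySem.Set.mem_union _ _ _).mpr (Or.inr ht)
        · intro t ht
          exact (PySem.Set.mem_union _ _ _).mpr (Or.inl (h1 t ht))
        · intro t ht
          rcases (PySem.Set.mem_union _ _ _).mp ht with h | h
          · exact h2 t h
          · obtain ⟨w, hw, ⟨s, hs, hgen⟩, _⟩ := (hmemnew t).mp h
            obtain ⟨m, hm⟩ := h2 s (h0 s hs)
            refine ⟨m + 1, ?_⟩
            rw [pvLev, Finset.mem_biUnion]
            exact ⟨s, hm, by
              simp only [pvGenF, List.mem_toFinset, List.mem_filterMap]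
              exact ⟨w, hw, hgen⟩⟩
        · intro s hsu hsnf w hw t hgen
          rcases (PySem.Set.mem_union _ _ _).mp hsu with hss | hsn
          · by_cases hsf : s ∈ frontier
            · have htc : t ∉ codigo := fun hc => hnohit ⟨w, hw, s, hsf, t, hgen, hc⟩
              refine ⟨?_, htc⟩
              by_cases hts : t ∈ seen
              · exact (PySem.Set.mem_union _ _ _).mpr (Or.inl hts)
              · exact (PySem.Set.mem_union _ _ _).mpr (Or.inr
                  ((hmemnew t).mpr ⟨w, hw, ⟨s, hsf, hgen⟩, hts⟩))
            · obtain ⟨hts, htc⟩ := h3 s hss hsf w hw t hgen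
              exact ⟨(PySem.Set.mem_union _ _ _).mpr (Or.inl hts), htc⟩
          · exact absurd hsn hsnf
        · intro t ht
          rcases (PySem.Set.mem_union _ _ _).mp ht with h | h
          · exact h4 t h
          · obtain ⟨w, hw, ⟨s, hs, hgen⟩, _⟩ := (hmemnew t).mp h
            exact pvGen_mem_U codigo w s t hw (h4 s (h0 s hs)) hgen
        · intro hnewne
          obtain ⟨u0, hu0⟩ := List.exists_mem_of_ne_nil newS hnewne
          have hu0ns : u0 ∉ seen := ((hmemnew u0).mp hu0).choose_spec.2.2
          have hsub : seen.toFinset ⊂ (PySem.Set.union seen newS).toFinset := by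
            constructor
            · intro x hx
              exact List.mem_toFinset.mpr
                ((PySem.Set.mem_union _ _ _).mpr (Or.inl (List.mem_toFinset.mp hx)))
            · intro hcontra
              exact hu0ns (List.mem_toFinset.mp (hcontra (List.mem_toFinset.mpr
                ((PySem.Set.mem_union _ _ _).mpr (Or.inr hu0)))))
          have hcard := Finset.card_lt_card hsub
          have := h5 hfr
          omega

lemma alt_iff_bad (codigo : List String) :
    (esUnivocamenteDecodificable_alt codigo = false) ↔ pvBad codigo := by
  unfold esUnivocamenteDecodificable_alt
  apply loopB_spec codigo
  · exact fun t ht => ht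
  · exact fun t ht => (PySem.Set.mem_ofList _ _).mpr ht
  · intro t ht
    exact ⟨0, List.mem_toFinset.mpr ((PySem.Set.mem_ofList _ _).mp ht)⟩
  · intro s hs hnf
    exact absurd hs hnf
  · intro t ht
    exact (mem_pvU codigo _).mpr ⟨t, (PySem.Set.mem_ofList _ _).mp ht, List.suffix_refl _⟩
  · intro _
    unfold pvN
    omega

-- ===== VERDICT (by name: the statement is the Claim_ definition above) =====
theorem esUnivocamenteDecodificable_spec : Claim_equal_esUnivocamenteDecodificable := by
  intro codigo _
  unfold Spec_esUnivocamenteDecodificable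
  have hA := esUD_iff_bad codigo
  have hB := alt_iff_bad codigo
  cases hA' : esUnivocamenteDecodificable codigo
  · exact ((hB.mpr (hA.mp hA')).symm)
  · rw [hA'] at hA
    cases hB' : esUnivocamenteDecodificable_alt codigo
    · exact absurd (hA.mpr (hB.mp hB')) (by simp)
    · rfl
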